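-- pv_equiv track=rewrite | github.com/Adm-Silvan/OCR-Processing-Pipeline | Monitoring/log_parser.py | find_chunk_id_transitions
-- ===== SOURCE A (Python) =====
-- def find_chunk_id_transitions(log_entries):
--     """
--     From the list of (timestamp, chunk_root), find timestamps where chunk_root changes.
--     Returns a list of tuples: (transition_timestamp, new_chunk_root)
--     Includes the first entry always as a start.
--     """
--     transitions = []
--     last_root = None
--     for timestamp, chunk_root in log_entries:
--         if chunk_root != last_root:
--             transitions.append((timestamp, chunk_root))
--             last_root = chunk_root
--     return transitions
-- ===== SOURCE B (Python) =====
-- def _split_runs(entries):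
--     """Split the list into maximal consecutive runs of equal chunk_root."""
--     runs = []
--     rest = entries
--     while rest:
--         root = rest[0][1]
--         k = 1
--         while k < len(rest) and rest[k][1] == root:
--             k += 1
--         runs.append(rest[:k])
--         rest = rest[k:]
--     return runs
--
--
-- def find_chunk_id_transitions(log_entries):
--     """
--     From the list of (timestamp, chunk_root), find timestamps where chunk_root changes.
--     Run-length decomposition: split the log into maximal runs of equal chunk_root,
--     then return the first entry of each run.
--     """
--     return [run[0] for run in _split_runs(log_entries)]
-- ===== Notes on version B (the rewrite author's own statement) =====
-- stated objective: alternative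
-- what changed: Replaces the single stateful scan carrying a mutable last_root with a run-length-encoding decomposition: the log is first split into maximal consecutive runs of equal chunk_root, then the first entry of each run is returned.
import Mathlib
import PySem

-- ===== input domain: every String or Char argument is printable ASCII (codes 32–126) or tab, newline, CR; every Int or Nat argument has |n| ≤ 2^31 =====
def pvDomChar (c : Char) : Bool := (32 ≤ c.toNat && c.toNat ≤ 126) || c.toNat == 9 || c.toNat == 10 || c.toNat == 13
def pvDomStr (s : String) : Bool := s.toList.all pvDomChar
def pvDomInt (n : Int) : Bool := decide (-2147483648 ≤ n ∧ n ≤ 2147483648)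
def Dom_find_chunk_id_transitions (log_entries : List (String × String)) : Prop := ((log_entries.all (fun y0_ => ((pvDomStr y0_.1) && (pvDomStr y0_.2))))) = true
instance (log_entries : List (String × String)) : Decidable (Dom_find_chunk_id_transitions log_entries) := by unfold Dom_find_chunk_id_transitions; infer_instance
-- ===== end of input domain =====

-- B replaces A's stateful last_root scan by a run-length decomposition (split into
-- maximal runs of equal root, take each run's first entry); same cost, same output.


-- ===== PORT A =====
-- Stateful loop: fold over the entries carrying (transitions, last_root).
def find_chunk_id_transitions (log_entries : List (String × String)) : List (String × String) :=
  (log_entries.foldl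
    (fun (st : List (String × String) × Option String) e =>
      if some e.2 ≠ st.2 then (st.1 ++ [e], some e.2) else st)
    ([], none)).1

-- ===== PORT B =====
-- _split_runs: split into maximal consecutive runs of equal root
-- (rest[:k] / rest[k:] with k = length of the equal-root prefix = takeWhile / dropWhile).
def fctSplitRuns : List (String × String) → List (List (String × String))
  | [] => []
  | e :: t =>
      (e :: t.takeWhile (fun x => x.2 == e.2)) :: fctSplitRuns (t.dropWhile (fun x => x.2 == e.2))
termination_by l => l.length
decreasing_by
  exact Nat.lt_succ_of_le (List.Sublist.length_le (List.dropWhile_sublist _))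

-- first entry of each run (runs are nonempty, so the default is never used)
def find_chunk_id_transitions_alt (log_entries : List (String × String)) : List (String × String) :=
  (fctSplitRuns log_entries).map (fun run => run.headD ("", ""))

-- ===== PRECONDITION & SPEC =====
def Spec_find_chunk_id_transitions (log_entries : List (String × String)) (out : List (String × String)) : Prop := out = find_chunk_id_transitions_alt log_entries
instance (log_entries : List (String × String)) (out : List (String × String)) : Decidable (Spec_find_chunk_id_transitions log_entries out) := by unfold Spec_find_chunk_id_transitions; infer_instance

-- ===== CLAIM (what is proved, stated in full; the proofs are below) =====
def Claim_equal_find_chunk_id_transitions : Prop := ∀ (log_entries : List (String × String)), Dom_find_chunk_id_transitions log_entries → Spec_find_chunk_id_transitions log_entries (find_chunk_id_transitions log_entries)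

-- ===== LEMMAS AND PROOFS =====

-- A's loop body, named for the lemmas.
def fctStep (st : List (String × String) × Option String) (e : String × String) :
    List (String × String) × Option String :=
  if some e.2 ≠ st.2 then (st.1 ++ [e], some e.2) else st

theorem fctA_eq_foldl (l : List (String × String)) :
    find_chunk_id_transitions l = (l.foldl fctStep ([], none)).1 := rfl

-- folding over entries whose root equals the carried last_root leaves the state unchanged
theorem fct_fold_const (l : List (String × String)) (st : List (String × String) × Option String)
    (h : ∀ x ∈ l, some x.2 = st.2) : l.foldl fctStep st = st := by
  induction l with
  | nil => rfl
  | cons e t ih =>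
    have he : some e.2 = st.2 := h e (List.mem_cons_self)
    have hstep : fctStep st e = st := by simp [fctStep, he]
    rw [List.foldl_cons, hstep]
    exact ih (fun x hx => h x (List.mem_cons_of_mem _ hx))

theorem fct_dropWhile_idem {α : Type} (p : α → Bool) (l : List α) :
    (l.dropWhile p).dropWhile p = l.dropWhile p := by
  induction l with
  | nil => rfl
  | cons e t ih =>
    by_cases h : p e
    · simp [h, ih]
    · simp [h]

-- main invariant: A's fold from (acc, r) produces acc ++ heads of the runs of the
-- suffix past the leading entries whose root equals r
theorem fct_fold_runs (n : Nat) : ∀ (l : List (String × String)), l.length ≤ n →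
    ∀ (acc : List (String × String)) (r : Option String),
    (l.foldl fctStep (acc, r)).1
      = acc ++ (fctSplitRuns (l.dropWhile (fun x => some x.2 == r))).map (fun run => run.headD ("", "")) := by
  induction n with
  | zero =>
    intro l hl acc r
    have : l = [] := List.length_eq_zero_iff.mp (Nat.le_zero.mp hl)
    subst this; simp [fctSplitRuns]
  | succ n ih =>
    intro l hl acc r
    cases l with
    | nil => simp [fctSplitRuns]
    | cons e t =>
      by_cases he : some e.2 = r
      · -- skipped entry: state unchanged, dropWhile also drops e
        have hstep : fctStep (acc, r) e = (acc, r) := by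
          simp [fctStep, he]
        simp only [List.foldl_cons, hstep]
        rw [ih t (Nat.le_of_succ_le_succ hl) acc r]
        have : (e :: t).dropWhile (fun x => some x.2 == r)
            = t.dropWhile (fun x => some x.2 == r) := by
          simp [he]
        rw [this]
      · -- transition: emit e, then the run of e.2 is skipped by fct_fold_const
        have hstep : fctStep (acc, r) e = (acc ++ [e], some e.2) := by
          simp [fctStep, he]
        simp only [List.foldl_cons, hstep]
        have hsplit : t = t.takeWhile (fun x => x.2 == e.2) ++ t.dropWhile (fun x => x.2 == e.2) :=
          (List.takeWhile_append_dropWhile).symm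
        rw [hsplit, List.foldl_append]
        rw [fct_fold_const (t.takeWhile (fun x => x.2 == e.2)) (acc ++ [e], some e.2) (by
          intro x hx
          have := List.mem_takeWhile_imp hx
          simp only [beq_iff_eq] at this
          simp [this])]
        have hlen : (t.dropWhile (fun x => x.2 == e.2)).length ≤ n := by
          have h1 : (t.dropWhile (fun x => x.2 == e.2)).length ≤ t.length :=
            List.Sublist.length_le (List.dropWhile_sublist _)
          have h2 : t.length ≤ n := Nat.le_of_succ_le_succ hl
          omega
        rw [ih _ hlen (acc ++ [e]) (some e.2)]
        have hddrop : (e :: t).dropWhile (fun x => some x.2 == r) = e :: t := by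
          simp [he]
        rw [← hsplit, hddrop]
        simp [fctSplitRuns, fct_dropWhile_idem]

-- ===== VERDICT (by name: the statement is the Claim_ definition above) =====
theorem find_chunk_id_transitions_spec : Claim_equal_find_chunk_id_transitions := by
  intro l _
  unfold Spec_find_chunk_id_transitions find_chunk_id_transitions_alt
  rw [fctA_eq_foldl, fct_fold_runs l.length l (Nat.le_refl _) [] none]
  have h0 : l.dropWhile (fun x => some x.2 == none) = l := by
    cases l with
    | nil => rfl
    | cons e t => simp
  rw [h0, List.nil_append]
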